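-- pv_equiv track=rewrite | github.com/tomboxfan/PythonClass03 | program3/python_0135_practice_add_number.py | solution1_math1
-- ===== SOURCE A (Python) =====
-- def solution1_math1(base_number, term_count):
--
--     # define a variable which store the final result
--     sum = 0
--
--     for term_no in range(term_count):
--
--         term_value = base_number
--
--         for _ in range(term_no):
--             term_value = term_value * 10 + base_number
--
--         sum += term_value
--
--     return sum
-- ===== SOURCE B (Python) =====
-- def solution1_math1(base_number, term_count):
--     total = 0
--     term = 0
--     for _ in range(term_count):
--         term = term * 10 + base_number
--         total += term
--     return total
-- ===== Notes on version B (the rewrite author's own statement) =====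
-- stated objective: faster
-- what changed: Replaces the nested loop that rebuilds each repunit-style term from scratch with a single pass that derives each term from the previous one (term = term*10 + base_number).
import Mathlib
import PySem

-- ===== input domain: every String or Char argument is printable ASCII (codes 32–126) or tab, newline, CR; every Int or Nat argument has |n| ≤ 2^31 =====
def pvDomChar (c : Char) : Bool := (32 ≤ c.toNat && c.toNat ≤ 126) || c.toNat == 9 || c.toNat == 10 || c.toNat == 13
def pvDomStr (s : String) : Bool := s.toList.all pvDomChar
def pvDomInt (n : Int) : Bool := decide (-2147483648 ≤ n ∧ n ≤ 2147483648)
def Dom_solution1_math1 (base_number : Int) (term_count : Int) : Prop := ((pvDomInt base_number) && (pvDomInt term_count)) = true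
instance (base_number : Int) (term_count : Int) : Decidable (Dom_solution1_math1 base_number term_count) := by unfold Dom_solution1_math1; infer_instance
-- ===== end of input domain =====

-- B replaces A's O(n^2) nested loop (each term rebuilt from scratch) with one O(n) pass
-- that derives each term from the previous one.

-- ===== PORT A =====
def solution1_math1 (base_number : Int) (term_count : Int) : Int :=
  (PySem.List.pyRange 0 term_count 1).foldl
    (fun sum term_no =>
      sum + (PySem.List.pyRange 0 term_no 1).foldl
        (fun term_value _ => term_value * 10 + base_number) base_number)
    0

-- ===== PORT B =====
def solution1_math1_alt (base_number : Int) (term_count : Int) : Int :=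
  ((PySem.List.pyRange 0 term_count 1).foldl
    (fun (p : Int × Int) _ =>
      (p.1 + (p.2 * 10 + base_number), p.2 * 10 + base_number))
    (0, 0)).1

-- ===== PRECONDITION & SPEC =====
def Spec_solution1_math1 (base_number : Int) (term_count : Int) (out : Int) : Prop := out = solution1_math1_alt base_number term_count
instance (base_number : Int) (term_count : Int) (out : Int) : Decidable (Spec_solution1_math1 base_number term_count out) := by unfold Spec_solution1_math1; infer_instance

-- ===== CLAIM (what is proved, stated in full; the proofs are below) =====
def Claim_equal_solution1_math1 : Prop := ∀ (base_number : Int) (term_count : Int), Dom_solution1_math1 base_number term_count → Spec_solution1_math1 base_number term_count (solution1_math1 base_number term_count)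

-- ===== LEMMAS AND PROOFS =====

-- value of the term with index n (A's inner loop result for term_no = n)
def pvTerm (b : Int) : Nat → Int
  | 0 => b
  | n + 1 => pvTerm b n * 10 + b

-- B's carried "previous term": 0 before the first iteration
def pvPrev (b : Int) : Nat → Int
  | 0 => 0
  | n + 1 => pvTerm b n

theorem pvTerm_eq_prev (b : Int) (n : Nat) : pvTerm b n = pvPrev b n * 10 + b := by
  cases n <;> simp [pvTerm, pvPrev]

theorem pvInner_foldl (b : Int) (n : Nat) :
    (PySem.List.pyRange 0 (n : Int) 1).foldl
      (fun term_value _ => term_value * 10 + b) b = pvTerm b n := by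
  induction n with
  | zero => simp [PySem.List.pyRange_one_eq_nil, pvTerm]
  | succ m ih =>
      have h : ((m : Int) + 1) = ((m + 1 : Nat) : Int) := by push_cast; ring
      rw [← h, PySem.List.pyRange_one_succ_right (by positivity), List.foldl_append, ih]
      simp [pvTerm]

theorem pvMain (b : Int) (n : Nat) :
    ((PySem.List.pyRange 0 (n : Int) 1).foldl
      (fun sum term_no =>
        sum + (PySem.List.pyRange 0 term_no 1).foldl
          (fun term_value _ => term_value * 10 + b) b) 0,
     pvPrev b n) =
    (PySem.List.pyRange 0 (n : Int) 1).foldl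
      (fun (p : Int × Int) _ => (p.1 + (p.2 * 10 + b), p.2 * 10 + b)) (0, 0) := by
  induction n with
  | zero => simp [PySem.List.pyRange_one_eq_nil, pvPrev]
  | succ m ih =>
      have h : ((m : Int) + 1) = ((m + 1 : Nat) : Int) := by push_cast; ring
      rw [← h, PySem.List.pyRange_one_succ_right (by positivity),
          List.foldl_append, List.foldl_append, ← ih]
      simp [pvInner_foldl, pvPrev, pvTerm_eq_prev b m]

-- ===== VERDICT (by name: the statement is the Claim_ definition above) =====
theorem solution1_math1_spec : Claim_equal_solution1_math1 := by
  intro b t _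
  unfold Spec_solution1_math1 solution1_math1 solution1_math1_alt
  rcases lt_or_ge 0 t with ht | ht
  · have h : t = ((t.toNat : Nat) : Int) := (Int.toNat_of_nonneg ht.le).symm
    rw [h, ← pvMain b t.toNat]
  · rw [PySem.List.pyRange_one_eq_nil ht]
    simp
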